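-- pv_equiv track=rewrite | github.com/swemoney/AdventOfCode | 2025/02/day.py | run_part_2
-- ===== SOURCE A (Python) =====
-- def run_part_2(data):
--     valid_ids = []
--
--     for r in data:
--         for x in r:
--             id = str(x)
--             for i in range(1, len(id)//2 + 1):
--                 pattern = id[:i]
--                 if len(id) % len(pattern) != 0:
--                     continue
--
--                 if id.count(pattern) == len(id)//len(pattern):
--                     valid_ids.append(int(id))
--                     break
--
--     return sum(valid_ids)
-- ===== SOURCE B (Python) =====
-- def run_part_2(data):
--     # A number counts iff its decimal string is a whole-number repetition of a
--     # shorter block; equivalently the string equals a nontrivial rotation of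
--     # itself, checked in O(L) expected time via (s+s).find(s, 1).
--     total = 0
--     for r in data:
--         for x in r:
--             s = str(x)
--             if (s + s).find(s, 1) != len(s):
--                 total += x
--     return total
-- ===== Notes on version B (the rewrite author's own statement) =====
-- stated objective: faster
-- what changed: A tries every candidate block length i up to len//2 and runs str.count over the whole string for each; B replaces the whole loop by the classic rotation trick — str(x) is a repetition of a shorter block iff (s+s).find(s,1) != len(s) — one substring search per number.
import Mathlib
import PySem

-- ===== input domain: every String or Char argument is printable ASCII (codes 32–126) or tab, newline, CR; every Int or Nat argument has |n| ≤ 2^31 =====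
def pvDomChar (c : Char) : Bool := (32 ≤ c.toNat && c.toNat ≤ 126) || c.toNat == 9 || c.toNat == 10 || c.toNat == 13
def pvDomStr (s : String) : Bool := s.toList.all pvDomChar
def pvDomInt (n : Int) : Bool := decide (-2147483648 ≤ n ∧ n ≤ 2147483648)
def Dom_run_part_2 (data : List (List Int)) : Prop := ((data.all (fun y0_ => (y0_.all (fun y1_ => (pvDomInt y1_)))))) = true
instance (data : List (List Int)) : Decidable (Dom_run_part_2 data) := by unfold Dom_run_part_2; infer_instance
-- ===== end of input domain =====

-- B replaces A's per-number scan over all candidate block lengths (a str.count per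
-- candidate) by one rotation test per number: str(x) repeats a shorter block iff
-- (s+s).find(s,1) != len(s).

-- ===== PORT A =====

-- the 'for i in range(1, len(id)//2 + 1): … append; break' loop: true iff some i appends
def pvALoop (id : List Char) : List Int → Bool
  | [] => false
  | i :: rest =>
    -- pattern = id[:i]
    let pattern := PySem.Chars.slice id none (some i)
    -- if len(id) % len(pattern) != 0: continue
    if PySem.Int.mod (PySem.Chars.len id) (PySem.Chars.len pattern) ≠ 0 then pvALoop id rest
    -- if id.count(pattern) == len(id) // len(pattern): append; break
    else if (PySem.Chars.count id pattern : Int) =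
              PySem.Int.floordiv (PySem.Chars.len id) (PySem.Chars.len pattern) then true
    else pvALoop id rest

def run_part_2 (data : List (List Int)) : Int :=
  -- id = str(x) is PySem.Int.toChars x (written out at each use)
  let valid_ids : List Int :=
    data.foldl (fun ids r =>
      r.foldl (fun ids x =>
        if pvALoop (PySem.Int.toChars x)
            (PySem.List.pyRange 1 (PySem.Int.floordiv (PySem.Chars.len (PySem.Int.toChars x)) 2 + 1) 1) then
          ids ++ [x]                            -- valid_ids.append(int(id)); int(str(x)) = x exactly
        else ids) ids) []
  valid_ids.sum

-- ===== PORT B =====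
def run_part_2_alt (data : List (List Int)) : Int :=
  -- s = str(x) is PySem.Int.toChars x (written out at each use)
  data.foldl (fun total r =>
    r.foldl (fun total x =>
      if PySem.Chars.findFrom (PySem.Int.toChars x ++ PySem.Int.toChars x)
            (PySem.Int.toChars x) 1 none ≠ PySem.Chars.len (PySem.Int.toChars x) then total + x
      else total) total) 0

-- ===== PRECONDITION & SPEC =====
def Spec_run_part_2 (data : List (List Int)) (out : Int) : Prop := out = run_part_2_alt data
instance (data : List (List Int)) (out : Int) : Decidable (Spec_run_part_2 data out) := by unfold Spec_run_part_2; infer_instance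

-- ===== CLAIM (what is proved, stated in full; the proofs are below) =====
def Claim_equal_run_part_2 : Prop := ∀ (data : List (List Int)), Dom_run_part_2 data → Spec_run_part_2 data (run_part_2 data)

-- ===== LEMMAS AND PROOFS =====

-- str(x) is never the empty string
lemma toChars_ne_nil (x : Int) : PySem.Int.toChars x ≠ [] := by
  have key : ∀ (f n : Nat) (l : List Char), l.length ≤ (Nat.toDigitsCore 10 f n l).length := by
    intro f
    induction f with
    | zero => intro n l; simp [Nat.toDigitsCore]
    | succ f ih =>
      intro n l
      simp only [Nat.toDigitsCore]
      split
      · simp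
      · exact le_trans (by simp) (ih (n/10) (Nat.digitChar (n % 10) :: l))
  have h10 : ∀ m : Nat, Nat.toDigits 10 m ≠ [] := by
    intro m
    simp only [Nat.toDigits, Nat.toDigitsCore]
    split
    · simp
    · intro h
      have := key m (m/10) [Nat.digitChar (m % 10)]
      rw [h] at this; simp at this
  unfold PySem.Int.toChars
  split
  · simp
  · exact h10 _

-- s is a repetition of its length-g prefix (g blocks of length g tile s)
def IsRep (s : List Char) (g : Nat) : Prop :=
  s = (List.replicate (s.length / g) (s.take g)).flatten

-- greedy count of p over p^k is exactly k
lemma count_go_pow (p : List Char) (hp : p ≠ []) :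
    ∀ (k fuel acc : Nat), p.length * k ≤ fuel →
      PySem.Chars.count.go p fuel ((List.replicate k p).flatten) acc = acc + k := by
  intro k
  induction k with
  | zero =>
    intro fuel acc _
    cases fuel with
    | zero => simp [PySem.Chars.count.go]
    | succ f => simp [PySem.Chars.count.go]
  | succ k ih =>
    intro fuel acc hf
    have hplen : 0 < p.length := List.length_pos_of_ne_nil hp
    have hfuel : 0 < fuel := by nlinarith
    obtain ⟨f, rfl⟩ : ∃ f, fuel = f + 1 := ⟨fuel - 1, by omega⟩
    obtain ⟨c, q, hpq⟩ : ∃ c q, p = c :: q := by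
      cases p with
      | nil => exact absurd rfl hp
      | cons c q => exact ⟨c, q, rfl⟩
    have hs : (List.replicate (k+1) p).flatten = c :: (q ++ (List.replicate k p).flatten) := by
      rw [List.replicate_succ, List.flatten_cons, hpq, List.cons_append]
    rw [hs, PySem.Chars.count.go]
    have hpre : p.isPrefixOf (c :: (q ++ (List.replicate k p).flatten)) = true := by
      rw [List.isPrefixOf_iff_prefix]
      exact ⟨(List.replicate k p).flatten, by rw [hpq, List.cons_append]⟩
    rw [if_pos hpre]
    have hdrop : (c :: (q ++ (List.replicate k p).flatten)).drop p.length
        = (List.replicate k p).flatten := by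
      have : c :: (q ++ (List.replicate k p).flatten) = p ++ (List.replicate k p).flatten := by
        rw [hpq, List.cons_append]
      rw [this, List.drop_left]
    rw [hdrop, ih f (acc+1) (by nlinarith)]
    omega

-- greedy count never exceeds |s| / |p|
lemma count_go_le (p : List Char) (hp : p ≠ []) :
    ∀ (fuel : Nat) (s : List Char) (acc : Nat),
      PySem.Chars.count.go p fuel s acc ≤ acc + s.length / p.length := by
  intro fuel
  have hplen : 0 < p.length := List.length_pos_of_ne_nil hp
  induction fuel with
  | zero =>
    intro s acc
    cases s <;> simp [PySem.Chars.count.go]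
  | succ f ih =>
    intro s acc
    cases s with
    | nil => simp [PySem.Chars.count.go]
    | cons c t =>
      rw [PySem.Chars.count.go]
      split
      · rename_i hpre
        have hle : p.length ≤ (c::t).length := by
          rw [List.isPrefixOf_iff_prefix] at hpre
          exact hpre.length_le
        calc PySem.Chars.count.go p f ((c::t).drop p.length) (acc+1)
            ≤ (acc+1) + ((c::t).drop p.length).length / p.length := ih _ _
          _ ≤ acc + (c::t).length / p.length := by
              simp only [List.length_drop]
              have e : (c::t).length = ((c::t).length - p.length) + p.length := by omega
              conv_rhs => rw [e]
              rw [Nat.add_div_right _ hplen]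
              omega
      · calc PySem.Chars.count.go p f t acc ≤ acc + t.length / p.length := ih _ _
          _ ≤ acc + (c::t).length / p.length := by
              have : t.length / p.length ≤ (c::t).length / p.length :=
                Nat.div_le_div_right (by simp)
              omega

-- if the greedy count reaches |s|/|p| and |p| divides |s|, s is a tiling by p
lemma count_go_eq_imp (p : List Char) (hp : p ≠ []) :
    ∀ (fuel : Nat) (s : List Char) (acc : Nat), s.length ≤ fuel →
      p.length ∣ s.length →
      PySem.Chars.count.go p fuel s acc = acc + s.length / p.length →
      s = (List.replicate (s.length / p.length) p).flatten := by
  intro fuel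
  have hplen : 0 < p.length := List.length_pos_of_ne_nil hp
  induction fuel with
  | zero =>
    intro s acc hn _ _
    have : s = [] := List.eq_nil_of_length_eq_zero (Nat.le_zero.mp hn)
    subst this; simp
  | succ f ih =>
    intro s acc hn hd hgo
    cases s with
    | nil => simp
    | cons c t =>
      have hlen : 0 < (c::t).length := by simp
      have hdle : p.length ≤ (c::t).length := Nat.le_of_dvd hlen hd
      obtain ⟨m, hm⟩ := hd
      have hm1 : 1 ≤ m := by nlinarith
      have hdiv : (c::t).length / p.length = m := by
        rw [hm, Nat.mul_div_cancel_left _ hplen]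
      rw [PySem.Chars.count.go] at hgo
      by_cases hpre : p.isPrefixOf (c::t) = true
      · rw [if_pos hpre] at hgo
        obtain ⟨rest, hrest⟩ := List.isPrefixOf_iff_prefix.mp hpre
        have hdropr : (c::t).drop p.length = rest := by rw [← hrest, List.drop_left]
        have hrlen : rest.length = p.length * (m-1) := by
          have h5 : (c::t).length = p.length + rest.length := by rw [← hrest]; simp
          rw [hm] at h5
          cases m with
          | zero => omega
          | succ m' =>
            have e2 : p.length * (m'+1) = p.length * m' + p.length := Nat.mul_succ _ _
            simp only [Nat.add_sub_cancel]
            omega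
        have hrdiv : rest.length / p.length = m - 1 := by
          rw [hrlen, Nat.mul_div_cancel_left _ hplen]
        have hrf : rest.length ≤ f := by
          have : rest.length = (c::t).length - p.length := by rw [← hrest]; simp
          omega
        have hrd : p.length ∣ rest.length := ⟨m-1, hrlen⟩
        have hgor : PySem.Chars.count.go p f rest (acc+1) = (acc+1) + rest.length / p.length := by
          rw [hdropr] at hgo
          rw [hgo, hdiv, hrdiv]; omega
        have := ih rest (acc+1) hrf hrd hgor
        rw [hdiv, ← hrest, hrdiv] at *
        have hmrepl : List.replicate m p = p :: List.replicate (m-1) p := by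
          cases m with
          | zero => omega
          | succ m' => simp [List.replicate_succ]
        rw [hmrepl, List.flatten_cons, ← this]
      · rw [if_neg hpre] at hgo
        exfalso
        have hle := count_go_le p hp f t acc
        rw [hgo] at hle
        have htdiv : t.length / p.length = m - 1 := by
          have ht : t.length + 1 = (c::t).length := by simp
          cases m with
          | zero => omega
          | succ m' =>
            have e2 : p.length * (m'+1) = p.length * m' + p.length := Nat.mul_succ _ _
            apply Nat.div_eq_of_lt_le
            · have e3 : (m'+1-1) * p.length = p.length * m' := by
                rw [Nat.mul_comm]; simp
              omega
            · have e4 : (m'+1-1+1) * p.length = p.length * (m'+1) := by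
                rw [Nat.mul_comm]; simp
              omega
        rw [hdiv] at hle
        rw [htdiv] at hle
        omega

-- commuting words: p ++ t = t ++ p with |p| dividing |t| makes t a power of p
lemma comm_pow (p : List Char) (hp : p ≠ []) :
    ∀ (n : Nat) (t : List Char), t.length ≤ n → p ++ t = t ++ p → p.length ∣ t.length →
      t = (List.replicate (t.length / p.length) p).flatten := by
  intro n
  induction n with
  | zero =>
    intro t hn _ _
    have : t = [] := List.eq_nil_of_length_eq_zero (Nat.le_zero.mp hn)
    subst this; simp
  | succ n ih =>
    intro t hn hc hd
    rcases eq_or_ne t [] with rfl | hne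
    · simp
    · have hplen : 0 < p.length := List.length_pos_of_ne_nil hp
      have htlen : 0 < t.length := List.length_pos_of_ne_nil hne
      have hle : p.length ≤ t.length := Nat.le_of_dvd htlen hd
      have htake : t.take p.length = p := by
        have h1 : (p ++ t).take p.length = p := by simp
        have h2 : (t ++ p).take p.length = t.take p.length := List.take_append_of_le_length hle
        rw [hc] at h1; rw [h2] at h1; exact h1
      have hdrop : t = t.drop p.length ++ p := by
        have h1 : (p ++ t).drop p.length = t := by simp
        have h2 : (t ++ p).drop p.length = t.drop p.length ++ p := List.drop_append_of_le_length hle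
        rw [hc, h2] at h1; exact h1.symm
      have hsplit : t = p ++ t.drop p.length := by
        conv_lhs => rw [← List.take_append_drop p.length t, htake]
      have hc' : p ++ t.drop p.length = t.drop p.length ++ p := hsplit.symm.trans hdrop
      have hd' : p.length ∣ (t.drop p.length).length := by
        simp only [List.length_drop]
        exact Nat.dvd_sub hd dvd_rfl
      have hlen' : (t.drop p.length).length ≤ n := by
        simp only [List.length_drop]; omega
      have ihres := ih (t.drop p.length) hlen' hc' hd'
      have hq : t.length / p.length = (t.drop p.length).length / p.length + 1 := by
        simp only [List.length_drop]
        have e : t.length = (t.length - p.length) + p.length := by omega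
        conv_lhs => rw [e]
        rw [Nat.add_div_right _ hplen]
      rw [hq, List.replicate_succ, List.flatten_cons, ← ihres, ← hsplit]

-- fixing shifts are closed under gcd
lemma rotate_gcd_self (s : List Char) (a b : Nat) (ha : s.rotate a = s) (hb : s.rotate b = s) :
    s.rotate (Nat.gcd a b) = s := by
  induction a, b using Nat.gcd.induction generalizing s with
  | H0 n => simpa using hb
  | H1 m n hm ih =>
    rw [Nat.gcd_rec]
    apply ih _ _ ha
    have h1 : s.rotate (n / m * m) = s := by
      induction (n/m) with
      | zero => simp
      | succ c ihc => rw [Nat.succ_mul, ← List.rotate_rotate, ihc, ha]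
    have e : n / m * m + n % m = n := by
      rw [Nat.mul_comm]; exact Nat.div_add_mod n m
    have h2 : s.rotate (n / m * m + n % m) = s := by rw [e, hb]
    rwa [← List.rotate_rotate, h1] at h2

-- a repetition with a proper block yields a nontrivial self-rotation
lemma rotate_of_rep (s : List Char) (g : Nat) (h0 : 0 < g) (hg : g ∣ s.length)
    (h2 : 2 * g ≤ s.length) (hr : IsRep s g) : s.rotate g = s ∧ g < s.length := by
  have hgle : g ≤ s.length := by omega
  have hlt : g < s.length := by omega
  set p := s.take g with hpdef
  have hplen : p.length = g := by simp [hpdef, List.length_take, hgle]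
  obtain ⟨m, hm⟩ := hg
  have hm2 : 2 ≤ m := by nlinarith
  have hdiv : s.length / g = m := by rw [hm, Nat.mul_div_cancel_left _ h0]
  unfold IsRep at hr
  rw [hdiv] at hr
  constructor
  · rw [List.rotate_eq_drop_append_take hgle]
    have hsp : s = p ++ (List.replicate (m-1) p).flatten := by
      conv_lhs => rw [hr]
      cases m with
      | zero => omega
      | succ m' => rw [List.replicate_succ, List.flatten_cons]; simp [hpdef]
    have hdropg : s.drop g = (List.replicate (m-1) p).flatten := by
      conv_lhs => rw [hsp]
      rw [← hplen, List.drop_left]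
    rw [hdropg, ← hpdef]
    conv_rhs => rw [hr]
    have : List.replicate m p = List.replicate (m-1) p ++ [p] := by
      cases m with
      | zero => omega
      | succ m' => rw [List.replicate_succ']; simp
    rw [this, List.flatten_append, List.flatten_cons, List.flatten_nil, List.append_nil]
  · exact hlt

-- a nontrivial self-rotation yields a repetition with a block dividing the length
lemma rep_of_rotate (s : List Char) (k : Nat) (h0 : 0 < k) (hk : k < s.length)
    (hr : s.rotate k = s) : ∃ g, 0 < g ∧ g ∣ s.length ∧ 2 * g ≤ s.length ∧ IsRep s g := by
  set n := s.length with hn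
  set g := Nat.gcd k n with hgdef
  have hg0 : 0 < g := Nat.gcd_pos_of_pos_left _ h0
  have hgd : g ∣ n := Nat.gcd_dvd_right _ _
  have hgk : g ≤ k := Nat.le_of_dvd h0 (Nat.gcd_dvd_left _ _)
  have hglt : g < n := lt_of_le_of_lt hgk hk
  have h2 : 2 * g ≤ n := by
    obtain ⟨m, hm⟩ := hgd
    have : 2 ≤ m := by nlinarith
    nlinarith
  have hrot : s.rotate g = s := rotate_gcd_self s k n hr (List.rotate_length s)
  refine ⟨g, hg0, hgd, h2, ?_⟩
  have hgle : g ≤ n := le_of_lt hglt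
  set p := s.take g with hpdef
  have hplen : p.length = g := by simp [hpdef, List.length_take]; omega
  have h1 : s = p ++ s.drop g := (List.take_append_drop g s).symm
  have h2' : s = s.drop g ++ p := by
    conv_lhs => rw [← hrot, List.rotate_eq_drop_append_take hgle]
  have hcomm : p ++ s.drop g = s.drop g ++ p := h1.symm.trans h2'
  have hdl : (s.drop g).length = n - g := by simp [hn]
  have hdd : p.length ∣ (s.drop g).length := by
    rw [hplen, hdl]; exact Nat.dvd_sub hgd dvd_rfl
  have hpow := comm_pow p (by
      intro h; rw [h] at hplen; simp at hplen; omega)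
    (s.drop g).length (s.drop g) le_rfl hcomm hdd
  unfold IsRep
  rw [← hpdef]
  conv_lhs => rw [h1, hpow]
  rw [hplen, hdl]
  have hq : n / g = (n - g) / g + 1 := by
    have e : n = (n - g) + g := by omega
    conv_lhs => rw [e]
    rw [Nat.add_div_right _ hg0]
  rw [hq, List.replicate_succ, List.flatten_cons]

-- the body of A's inner test at one candidate i
def ACond (s : List Char) (i : Int) : Prop :=
  PySem.Int.mod (PySem.Chars.len s) (PySem.Chars.len (PySem.Chars.slice s none (some i))) = 0 ∧
  (PySem.Chars.count s (PySem.Chars.slice s none (some i)) : Int) =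
    PySem.Int.floordiv (PySem.Chars.len s) (PySem.Chars.len (PySem.Chars.slice s none (some i)))

lemma pvALoop_eq_any (s : List Char) (l : List Int) :
    pvALoop s l = true ↔ ∃ i ∈ l, ACond s i := by
  induction l with
  | nil => simp [pvALoop]
  | cons i rest ih =>
    rw [pvALoop]
    by_cases h1 : PySem.Int.mod (PySem.Chars.len s) (PySem.Chars.len (PySem.Chars.slice s none (some i))) ≠ 0
    · rw [if_pos h1, ih]
      constructor
      · rintro ⟨j, hj, hc⟩; exact ⟨j, List.mem_cons_of_mem _ hj, hc⟩
      · rintro ⟨j, hj, hc⟩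
        rcases List.mem_cons.mp hj with rfl | hj'
        · exact absurd hc.1 h1
        · exact ⟨j, hj', hc⟩
    · rw [if_neg h1]
      simp only [ne_eq, not_not] at h1
      by_cases h2 : (PySem.Chars.count s (PySem.Chars.slice s none (some i)) : Int) =
          PySem.Int.floordiv (PySem.Chars.len s) (PySem.Chars.len (PySem.Chars.slice s none (some i)))
      · simp only [if_pos h2]
        constructor
        · intro _; exact ⟨i, List.mem_cons_self, h1, h2⟩
        · intro _; simp
      · simp only [if_neg h2, ih]
        constructor
        · rintro ⟨j, hj, hc⟩; exact ⟨j, List.mem_cons_of_mem _ hj, hc⟩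
        · rintro ⟨j, hj, hc⟩
          rcases List.mem_cons.mp hj with rfl | hj'
          · exact absurd hc.2 h2
          · exact ⟨j, hj', hc⟩

-- A's count test at block size g says exactly "s is tiled by its length-g prefix"
lemma count_iff_isrep (s : List Char) (g : Nat) (hs : s ≠ []) (hg0 : 0 < g)
    (hgd : g ∣ s.length) :
    PySem.Chars.count s (s.take g) = s.length / g ↔ IsRep s g := by
  have hn : 0 < s.length := List.length_pos_of_ne_nil hs
  have hgle : g ≤ s.length := Nat.le_of_dvd hn hgd
  set p := s.take g with hpdef
  have hplen : p.length = g := by simp [hpdef]; omega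
  have hpne : p ≠ [] := by
    intro h; rw [h] at hplen; simp at hplen; omega
  have hcount : PySem.Chars.count s p = PySem.Chars.count.go p s.length s 0 := by
    rw [PySem.Chars.count]
    rw [if_neg (by simp [List.isEmpty_iff, hpne])]
  constructor
  · intro h
    unfold IsRep
    rw [← hpdef, ← hplen]
    apply count_go_eq_imp p hpne s.length s 0 le_rfl (hplen ▸ hgd)
    rw [← hcount, h, hplen]
    omega
  · intro h
    unfold IsRep at h
    rw [← hpdef] at h
    have hfuel : p.length * (s.length / g) ≤ s.length := by
      rw [hplen, Nat.mul_div_cancel' hgd]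
    have hpow := count_go_pow p hpne (s.length / g) s.length 0 hfuel
    rw [← h] at hpow
    rw [hcount, hpow]
    omega

-- A's whole inner loop: some admissible block length tiles the string
lemma pvALoop_iff (s : List Char) (hs : s ≠ []) :
    pvALoop s (PySem.List.pyRange 1 (PySem.Int.floordiv (PySem.Chars.len s) 2 + 1) 1) = true
      ↔ ∃ g : Nat, 0 < g ∧ g ∣ s.length ∧ 2 * g ≤ s.length ∧ IsRep s g := by
  have hn : 0 < s.length := List.length_pos_of_ne_nil hs
  have hlen : PySem.Chars.len s = (s.length : Int) := by simp [PySem.Chars.len_eq]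
  have hfd : PySem.Int.floordiv (PySem.Chars.len s) 2 = ((s.length / 2 : Nat) : Int) := by
    rw [hlen]; exact_mod_cast PySem.Int.floordiv_natCast s.length 2
  rw [pvALoop_eq_any, hfd]
  constructor
  · rintro ⟨i, hi, hmod, hcnt⟩
    rw [PySem.List.mem_pyRange_one] at hi
    obtain ⟨hi1, hi2⟩ := hi
    have hig : i = ((i.toNat : Nat) : Int) := by omega
    set g := i.toNat with hgdef
    have hg1 : 1 ≤ g := by omega
    have hg2 : g ≤ s.length / 2 := by omega
    have hslice : PySem.Chars.slice s none (some i) = s.take g := by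
      simp only [PySem.Chars.slice_eq_listSlice]
      rw [PySem.List.slice_to s (by omega : (0:Int) ≤ i)]
    have hgle : g ≤ s.length := le_trans hg2 (Nat.div_le_self _ _)
    have hplen : PySem.Chars.len (PySem.Chars.slice s none (some i)) = (g : Int) := by
      rw [hslice]; simp [PySem.Chars.len_eq, List.length_take]; omega
    rw [hplen, hlen] at hmod hcnt
    have hdvd : g ∣ s.length := by
      rw [PySem.Int.mod_eq_zero_iff_dvd] at hmod
      exact_mod_cast hmod
    have hfd2 : PySem.Int.floordiv ((s.length : Nat) : Int) ((g : Nat) : Int)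
        = ((s.length / g : Nat) : Int) := PySem.Int.floordiv_natCast _ _
    rw [hslice, hfd2] at hcnt
    have hcnt2 : PySem.Chars.count s (s.take g) = s.length / g := by exact_mod_cast hcnt
    exact ⟨g, by omega, hdvd, by omega, (count_iff_isrep s g hs (by omega) hdvd).mp hcnt2⟩
  · rintro ⟨g, hg0, hgd, h2g, hrep⟩
    refine ⟨(g : Int), ?_, ?_, ?_⟩
    · rw [PySem.List.mem_pyRange_one]
      constructor
      · omega
      · have : g ≤ s.length / 2 := by omega
        omega
    · have hslice : PySem.Chars.slice s none (some (g:Int)) = s.take g := by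
        simp only [PySem.Chars.slice_eq_listSlice]
        rw [PySem.List.slice_to s (by omega : (0:Int) ≤ (g:Int))]
        simp
      rw [hslice, hlen]
      have hplen : PySem.Chars.len (s.take g) = (g : Int) := by
        simp [PySem.Chars.len_eq, List.length_take]
        omega
      rw [hplen, PySem.Int.mod_eq_zero_iff_dvd]
      exact_mod_cast hgd
    · have hslice : PySem.Chars.slice s none (some (g:Int)) = s.take g := by
        simp only [PySem.Chars.slice_eq_listSlice]
        rw [PySem.List.slice_to s (by omega : (0:Int) ≤ (g:Int))]
        simp
      have hplen : PySem.Chars.len (s.take g) = (g : Int) := by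
        simp [PySem.Chars.len_eq, List.length_take]
        omega
      rw [hslice, hplen, hlen, PySem.Int.floordiv_natCast]
      have := (count_iff_isrep s g hs hg0 hgd).mpr hrep
      exact_mod_cast this

-- occurrence of s inside (s++s).drop p says exactly "rotation by p fixes s"
lemma occ_iff_rotate (s : List Char) (p : Nat) (hp : p ≤ s.length) :
    s <+: (s ++ s).drop p ↔ s.rotate p = s := by
  have hdrop : (s ++ s).drop p = s.drop p ++ s := List.drop_append_of_le_length hp
  have hrot : s.rotate p = s.drop p ++ s.take p := List.rotate_eq_drop_append_take hp
  rw [hdrop, List.prefix_iff_eq_take]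
  have htake : (s.drop p ++ s).take s.length = s.drop p ++ s.take p := by
    rw [List.take_append]
    have h1 : (s.drop p).take s.length = s.drop p := List.take_of_length_le (by simp)
    have h2 : s.length - (s.drop p).length = p := by simp; omega
    rw [h1, h2]
  rw [htake, ← hrot]
  exact ⟨fun h => h.symm, fun h => h.symm⟩

-- B's test: (s+s).find(s,1) != len(s) says exactly "some nontrivial rotation fixes s"
lemma findFrom_iff (s : List Char) (hs : s ≠ []) :
    (PySem.Chars.findFrom (s ++ s) s 1 none ≠ PySem.Chars.len s)
      ↔ ∃ k, 0 < k ∧ k < s.length ∧ s.rotate k = s := by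
  have hn : 0 < s.length := List.length_pos_of_ne_nil hs
  set n := s.length with hndef
  have h1le : (1:Nat) ≤ (s ++ s).length := by simp; omega
  have heq := PySem.Chars.findFrom_natCast (s ++ s) s 1 h1le
  push_cast at heq
  have hfind0 : 0 ≤ PySem.Chars.find ((s ++ s).drop 1) s := by
    rw [PySem.Chars.find_nonneg_iff]
    have : s <:+ (s ++ s).drop 1 := by
      obtain ⟨c, t, rfl⟩ : ∃ c t, s = c :: t := by
        cases s with
        | nil => exact absurd rfl hs
        | cons c t => exact ⟨c, t, rfl⟩
      simp [List.drop_append_of_le_length]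
    exact this.isInfix
  set F := PySem.Chars.find ((s ++ s).drop 1) s with hF
  have hne : F ≠ -1 := by omega
  rw [if_neg hne] at heq
  obtain ⟨hocc, hmin⟩ := PySem.Chars.find_spec (s := (s ++ s).drop 1) (sub := s) hfind0
  set j := F.toNat with hj
  have hdd : ∀ i : Nat, ((s ++ s).drop 1).drop i = (s ++ s).drop (1 + i) := by
    intro i; rw [List.drop_drop]
  have hocc_n : s <+: ((s ++ s).drop 1).drop (n - 1) := by
    rw [hdd, show 1 + (n-1) = n by omega]
    rw [occ_iff_rotate s n le_rfl, hndef]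
    exact List.rotate_length s
  have hjle : j ≤ n - 1 := by
    by_contra h
    exact hmin (n-1) (by omega) hocc_n
  have hlen : PySem.Chars.len s = (n : Int) := by simp [PySem.Chars.len_eq, hndef]
  constructor
  · intro hne2
    rw [heq, hlen] at hne2
    have hjn : j + 1 < n := by
      rcases Nat.lt_or_ge (j+1) n with h | h
      · exact h
      · exfalso; apply hne2
        have : F = (j : Int) := by omega
        omega
    refine ⟨j + 1, by omega, hjn, ?_⟩
    rw [← occ_iff_rotate s (j+1) (by omega)]
    rw [hdd] at hocc
    rwa [show 1 + j = j + 1 by omega] at hocc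
  · intro ⟨k, hk0, hkn, hkrot⟩
    rw [heq, hlen]
    have hocc_k : s <+: ((s ++ s).drop 1).drop (k - 1) := by
      rw [hdd, show 1 + (k-1) = k by omega]
      rw [occ_iff_rotate s k (by omega)]
      exact hkrot
    have : j ≤ k - 1 := by
      by_contra h
      exact hmin (k-1) (by omega) hocc_k
    intro hcon
    have : F = (j:Int) := by omega
    omega

-- the two per-number tests agree
lemma tests_agree (x : Int) :
    pvALoop (PySem.Int.toChars x)
        (PySem.List.pyRange 1 (PySem.Int.floordiv (PySem.Chars.len (PySem.Int.toChars x)) 2 + 1) 1)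
      = decide (PySem.Chars.findFrom (PySem.Int.toChars x ++ PySem.Int.toChars x)
                  (PySem.Int.toChars x) 1 none ≠ PySem.Chars.len (PySem.Int.toChars x)) := by
  set s := PySem.Int.toChars x with hsdef
  have hs : s ≠ [] := toChars_ne_nil x
  have hiff : (∃ g : Nat, 0 < g ∧ g ∣ s.length ∧ 2 * g ≤ s.length ∧ IsRep s g)
      ↔ ∃ k, 0 < k ∧ k < s.length ∧ s.rotate k = s := by
    constructor
    · rintro ⟨g, hg0, hgd, h2g, hrep⟩
      obtain ⟨hrot, hlt⟩ := rotate_of_rep s g hg0 hgd h2g hrep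
      exact ⟨g, hg0, hlt, hrot⟩
    · rintro ⟨k, hk0, hkn, hkrot⟩
      exact rep_of_rotate s k hk0 hkn hkrot
  have main : (pvALoop s
      (PySem.List.pyRange 1 (PySem.Int.floordiv (PySem.Chars.len s) 2 + 1) 1) = true)
      ↔ (PySem.Chars.findFrom (s ++ s) s 1 none ≠ PySem.Chars.len s) :=
    (pvALoop_iff s hs).trans (hiff.trans (findFrom_iff s hs).symm)
  by_cases h : pvALoop s
      (PySem.List.pyRange 1 (PySem.Int.floordiv (PySem.Chars.len s) 2 + 1) 1) = true
  · rw [h]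
    exact (decide_eq_true (main.mp h)).symm
  · have hb : pvALoop s
        (PySem.List.pyRange 1 (PySem.Int.floordiv (PySem.Chars.len s) 2 + 1) 1) = false :=
      Bool.not_eq_true _ ▸ (by simpa using h)
    rw [hb]
    exact (decide_eq_false (fun hc => h (main.mpr hc))).symm

-- the per-number test as one Bool
def pvOk (x : Int) : Bool :=
  pvALoop (PySem.Int.toChars x)
    (PySem.List.pyRange 1 (PySem.Int.floordiv (PySem.Chars.len (PySem.Int.toChars x)) 2 + 1) 1)

-- A's inner fold appends exactly the valid elements
lemma innerA_eq (r ids : List Int) :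
    r.foldl (fun ids x =>
      if pvALoop (PySem.Int.toChars x)
          (PySem.List.pyRange 1 (PySem.Int.floordiv (PySem.Chars.len (PySem.Int.toChars x)) 2 + 1) 1)
        then ids ++ [x] else ids) ids
      = ids ++ r.filter pvOk := by
  induction r generalizing ids with
  | nil => simp
  | cons y t ih =>
    rw [List.foldl_cons, List.filter_cons]
    by_cases h : pvOk y = true
    · have h' : pvALoop (PySem.Int.toChars y)
          (PySem.List.pyRange 1 (PySem.Int.floordiv (PySem.Chars.len (PySem.Int.toChars y)) 2 + 1) 1)
          = true := h
      rw [if_pos h', ih, if_pos h]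
      simp
    · have h' : ¬ (pvALoop (PySem.Int.toChars y)
          (PySem.List.pyRange 1 (PySem.Int.floordiv (PySem.Chars.len (PySem.Int.toChars y)) 2 + 1) 1)
          = true) := h
      rw [if_neg h', ih, if_neg (by simpa using h)]

-- B's inner fold adds exactly the valid elements
lemma innerB_eq (r : List Int) (t : Int) :
    r.foldl (fun total x =>
      if PySem.Chars.findFrom (PySem.Int.toChars x ++ PySem.Int.toChars x)
            (PySem.Int.toChars x) 1 none ≠ PySem.Chars.len (PySem.Int.toChars x)
        then total + x else total) t
      = t + (r.filter pvOk).sum := by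
  induction r generalizing t with
  | nil => simp
  | cons y u ih =>
    rw [List.foldl_cons, List.filter_cons]
    have hy : pvOk y = decide (PySem.Chars.findFrom (PySem.Int.toChars y ++ PySem.Int.toChars y)
        (PySem.Int.toChars y) 1 none ≠ PySem.Chars.len (PySem.Int.toChars y)) := tests_agree y
    by_cases hc : PySem.Chars.findFrom (PySem.Int.toChars y ++ PySem.Int.toChars y)
        (PySem.Int.toChars y) 1 none ≠ PySem.Chars.len (PySem.Int.toChars y)
    · have hb : pvOk y = true := by rw [hy]; exact decide_eq_true hc
      rw [if_pos hc, ih, if_pos hb, List.sum_cons]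
      ring
    · have hb : ¬ (pvOk y = true) := by
        rw [hy]; simp only [decide_eq_true_eq]; exact hc
      rw [if_neg hc, ih, if_neg (by simpa using hb)]

-- ===== VERDICT (by name: the statement is the Claim_ definition above) =====
theorem run_part_2_spec : Claim_equal_run_part_2 := by
  intro data _
  unfold Spec_run_part_2 run_part_2 run_part_2_alt
  have houtA : ∀ (rs : List (List Int)) (ids : List Int),
      rs.foldl (fun ids r => r.foldl (fun ids x =>
        if pvALoop (PySem.Int.toChars x)
            (PySem.List.pyRange 1 (PySem.Int.floordiv (PySem.Chars.len (PySem.Int.toChars x)) 2 + 1) 1)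
          then ids ++ [x] else ids) ids) ids
        = ids ++ (rs.map (fun r => r.filter pvOk)).flatten := by
    intro rs
    induction rs with
    | nil => intro ids; simp
    | cons r t ih =>
      intro ids
      rw [List.foldl_cons, innerA_eq, ih, List.map_cons, List.flatten_cons, List.append_assoc]
  have houtB : ∀ (rs : List (List Int)) (t : Int),
      rs.foldl (fun total r => r.foldl (fun total x =>
        if PySem.Chars.findFrom (PySem.Int.toChars x ++ PySem.Int.toChars x)
              (PySem.Int.toChars x) 1 none ≠ PySem.Chars.len (PySem.Int.toChars x)
          then total + x else total) total) t
        = t + ((rs.map (fun r => r.filter pvOk)).flatten.sum) := by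
    intro rs
    induction rs with
    | nil => intro t; simp
    | cons r u ih =>
      intro t
      rw [List.foldl_cons, innerB_eq, ih, List.map_cons, List.flatten_cons, List.sum_append]
      ring
  rw [houtA data [], houtB data 0]
  simp
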